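-- pv_equiv track=rewrite | github.com/OddmarRune/adventofcode | 2023/Dec13/dec13.py | check_horz
-- ===== SOURCE A (Python) =====
-- def check_horz(block, r = 0):
--     """Check if block is symmetric with horizontal mirror"""
--     if (len(block)-r)%2 == 1 or len(block)-1 <= abs(r):
--         return 100
--     if r >= 0:
--         return sum([sum([0 if block[i+r][l] == block[-1-i][l] else 1 \
--                     for l in range(len(block[0]))]) for i in range(len(block)-r)])//2
--     else:
--         return sum([sum([0 if block[i][l] == block[-1-i+r][l] else 1 for \
--                     l in range(len(block[0]))]) for i in range(len(block)+r)])//2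
-- ===== SOURCE B (Python) =====
-- def check_horz(block, r = 0):
--     """Check if block is symmetric with horizontal mirror"""
--     if (len(block)-r)%2 == 1 or len(block)-1 <= abs(r):
--         return 100
--     if r >= 0:
--         lo, hi = r, len(block)-1
--     else:
--         lo, hi = 0, len(block)-1+r
--     width = len(block[0])
--     total = 0
--     while lo < hi:
--         total += sum(block[lo][l] != block[hi][l] for l in range(width))
--         lo += 1
--         hi -= 1
--     return total
-- ===== Notes on version B (the rewrite author's own statement) =====
-- stated objective: alternative
-- what changed: Replaced A's double-counting nested comprehensions (every mirror pair counted twice, then //2) by a two-pointer outward walk that counts each mirror pair exactly once, with no final halving.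
import Mathlib
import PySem

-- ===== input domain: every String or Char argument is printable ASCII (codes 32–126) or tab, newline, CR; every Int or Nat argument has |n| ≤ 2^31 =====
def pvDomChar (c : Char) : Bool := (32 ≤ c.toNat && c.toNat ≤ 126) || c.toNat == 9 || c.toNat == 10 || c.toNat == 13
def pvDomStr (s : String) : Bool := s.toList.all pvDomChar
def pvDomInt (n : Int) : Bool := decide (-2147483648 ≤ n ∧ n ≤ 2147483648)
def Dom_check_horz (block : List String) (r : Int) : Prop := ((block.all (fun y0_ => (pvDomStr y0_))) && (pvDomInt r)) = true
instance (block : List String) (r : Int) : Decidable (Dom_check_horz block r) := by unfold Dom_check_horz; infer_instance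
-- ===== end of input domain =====

-- B replaces A's double-counting comprehensions (each mirror pair counted twice, then //2) by a
-- two-pointer outward walk that visits each mirror pair once (objective: alternative decomposition).

-- ===== PORT A =====
def check_horz (block : List String) (r : Int) : Int :=
  if PySem.Int.mod ((block.length : Int) - r) 2 = 1 ∨ (block.length : Int) - 1 ≤ |r| then 100
  else if 0 ≤ r then
    PySem.Int.floordiv
      (((PySem.List.pyRange 0 ((block.length : Int) - r) 1).map (fun i =>
        ((PySem.List.pyRange 0 (PySem.Str.len (PySem.List.pyGetD block 0 "")) 1).map (fun l =>
          if PySem.Str.pyGet? (PySem.List.pyGetD block (i + r) "") l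
               = PySem.Str.pyGet? (PySem.List.pyGetD block (-1 - i) "") l
          then (0 : Int) else 1)).sum)).sum) 2
  else
    PySem.Int.floordiv
      (((PySem.List.pyRange 0 ((block.length : Int) + r) 1).map (fun i =>
        ((PySem.List.pyRange 0 (PySem.Str.len (PySem.List.pyGetD block 0 "")) 1).map (fun l =>
          if PySem.Str.pyGet? (PySem.List.pyGetD block i "") l
               = PySem.Str.pyGet? (PySem.List.pyGetD block (-1 - i + r) "") l
          then (0 : Int) else 1)).sum)).sum) 2

-- ===== PORT B =====
-- the while loop of Source B, with its accumulator `total`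
def check_horz_altLoop (block : List String) (w : Int) (total lo hi : Int) : Int :=
  if h : lo < hi then
    check_horz_altLoop block w
      (total + ((PySem.List.pyRange 0 w 1).map (fun l =>
        if PySem.Str.pyGet? (PySem.List.pyGetD block lo "") l
             ≠ PySem.Str.pyGet? (PySem.List.pyGetD block hi "") l
        then (1 : Int) else 0)).sum)
      (lo + 1) (hi - 1)
  else total
termination_by (hi - lo).toNat
decreasing_by omega

def check_horz_alt (block : List String) (r : Int) : Int :=
  if PySem.Int.mod ((block.length : Int) - r) 2 = 1 ∨ (block.length : Int) - 1 ≤ |r| then 100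
  else
    let lo : Int := if 0 ≤ r then r else 0
    let hi : Int := if 0 ≤ r then (block.length : Int) - 1 else (block.length : Int) - 1 + r
    let w : Int := PySem.Str.len (PySem.List.pyGetD block 0 "")
    check_horz_altLoop block w 0 lo hi

-- ===== PRECONDITION & SPEC =====
-- Pre_ excludes exactly the inputs on which Python A raises IndexError: the guard does not fire and
-- some row in the mirrored range is shorter than row 0 (B raises there too).
def Pre_check_horz (block : List String) (r : Int) : Prop :=
  (PySem.Int.mod ((block.length : Int) - r) 2 = 1 ∨ (block.length : Int) - 1 ≤ |r|) ∨
  ∀ s ∈ (if 0 ≤ r then block.drop r.toNat else block.take ((block.length : Int) + r).toNat),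
    PySem.Str.len (PySem.List.pyGetD block 0 "") ≤ PySem.Str.len s
instance (block : List String) (r : Int) : Decidable (Pre_check_horz block r) := by
  unfold Pre_check_horz; infer_instance

def pvWitness_check_horz : List String × Int := (["ab", "cd", "cd", "ab"], 0)

def Spec_check_horz (block : List String) (r : Int) (out : Int) : Prop := out = check_horz_alt block r
instance (block : List String) (r : Int) (out : Int) : Decidable (Spec_check_horz block r out) := by
  unfold Spec_check_horz; infer_instance

-- ===== CLAIM (what is proved, stated in full; the proofs are below) =====
def Claim_equal_check_horz : Prop := ∀ (block : List String) (r : Int), Dom_check_horz block r → Pre_check_horz block r → Spec_check_horz block r (check_horz block r)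

-- ===== LEMMAS AND PROOFS =====

-- mismatch count of the row pair (a, b), as both ports compute it
def rowdiff (block : List String) (w a b : Int) : Int :=
  ((PySem.List.pyRange 0 w 1).map (fun l =>
    if PySem.Str.pyGet? (PySem.List.pyGetD block a "") l
         = PySem.Str.pyGet? (PySem.List.pyGetD block b "") l
    then (0 : Int) else 1)).sum

lemma rowdiff_symm (block : List String) (w a b : Int) :
    rowdiff block w a b = rowdiff block w b a := by
  unfold rowdiff
  congr 1
  apply List.map_congr_left
  intro l _
  by_cases h : PySem.Str.pyGet? (PySem.List.pyGetD block a "") l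
      = PySem.Str.pyGet? (PySem.List.pyGetD block b "") l
  · rw [if_pos h, if_pos h.symm]
  · rw [if_neg h, if_neg (fun h' => h h'.symm)]

-- Python's negative row index -1-j is row n-1-j
lemma pyGetD_neg_shift (xs : List String) (j : Int) (h1 : 0 ≤ j) (h2 : j < (xs.length : Int)) :
    PySem.List.pyGetD xs (-1 - j) "" = PySem.List.pyGetD xs ((xs.length : Int) - 1 - j) "" := by
  have hj : -1 - j = -(((j.toNat + 1 : Nat) : Int)) := by omega
  have hR : (xs.length : Int) - 1 - j = (((xs.length - (j.toNat + 1) : Nat) : Nat) : Int) := by omega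
  rw [hj, hR, PySem.List.pyGetD_neg_natCast _ _ _ (by omega) (by omega),
      PySem.List.pyGetD_natCast, List.getD_eq_getElem _ _ (by omega)]

-- shifting the accumulator `total` shifts the loop's result
lemma altLoop_shift (block : List String) (w : Int) :
    ∀ (m : Nat) (lo hi : Int), (hi - lo).toNat = m → ∀ t d : Int,
      check_horz_altLoop block w (t + d) lo hi = check_horz_altLoop block w t lo hi + d := by
  intro m
  induction m using Nat.strong_induction_on with
  | _ m ih =>
    intro lo hi hm t d
    conv_lhs => rw [check_horz_altLoop]
    conv_rhs => rw [check_horz_altLoop]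
    by_cases h : lo < hi
    · rw [dif_pos h, dif_pos h]
      have e : ∀ S : Int, t + d + S = (t + S) + d := by intro S; ring
      rw [e, ih ((hi - 1) - (lo + 1)).toNat (by omega) (lo + 1) (hi - 1) rfl]
    · rw [dif_neg h, dif_neg h]

-- the while loop with accumulator `total` versus the loop started at 0
lemma altLoop_acc (block : List String) (w total lo hi : Int) :
    check_horz_altLoop block w total lo hi = total + check_horz_altLoop block w 0 lo hi := by
  have := altLoop_shift block w (hi - lo).toNat lo hi rfl 0 total
  rw [zero_add] at this
  rw [this]
  ring

-- one unfolding of the loop, with the body expressed through rowdiff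
lemma altLoop_step (block : List String) (w lo hi : Int) (h : lo < hi) :
    check_horz_altLoop block w 0 lo hi
      = rowdiff block w lo hi + check_horz_altLoop block w 0 (lo + 1) (hi - 1) := by
  conv_lhs => rw [check_horz_altLoop]
  rw [dif_pos h, altLoop_acc block w _ (lo + 1) (hi - 1)]
  have hbody : ((PySem.List.pyRange 0 w 1).map (fun l =>
      if PySem.Str.pyGet? (PySem.List.pyGetD block lo "") l
           ≠ PySem.Str.pyGet? (PySem.List.pyGetD block hi "") l
      then (1 : Int) else 0)).sum = rowdiff block w lo hi := by
    unfold rowdiff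
    congr 1
    apply List.map_congr_left
    intro l _
    by_cases hc : PySem.Str.pyGet? (PySem.List.pyGetD block lo "") l
        = PySem.Str.pyGet? (PySem.List.pyGetD block hi "") l
    · rw [if_neg (not_not_intro hc), if_pos hc]
    · rw [if_pos hc, if_neg hc]
  rw [hbody]
  ring

-- A's full double-counting sum equals twice B's half loop
lemma sum_eq_two_loop (block : List String) (w : Int) :
    ∀ (k : Nat) (lo hi : Int), hi + 1 - lo = 2 * (k : Int) →
      ((PySem.List.pyRange 0 (2 * (k : Int)) 1).map (fun i => rowdiff block w (lo + i) (hi - i))).sum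
        = 2 * check_horz_altLoop block w 0 lo hi := by
  intro k
  induction k with
  | zero =>
      intro lo hi h
      rw [check_horz_altLoop, dif_neg (by omega)]
      simp
  | succ k ih =>
      intro lo hi h
      have hm : (2 * ((k + 1 : Nat) : Int)) = 2 * (k : Int) + 2 := by push_cast; ring
      rw [hm]
      rw [PySem.List.pyRange_one_append 0 1 (2 * (k : Int) + 2) (by omega) (by omega),
          PySem.List.pyRange_one_append 1 (2 * (k : Int) + 1) (2 * (k : Int) + 2) (by omega) (by omega)]
      have h1 : PySem.List.pyRange 0 1 1 = [0] := by
        have := PySem.List.pyRange_one_singleton (0 : Int)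
        rw [show ((0 : Int) + 1) = 1 from by norm_num] at this
        exact this
      have h2 : PySem.List.pyRange (2 * (k : Int) + 1) (2 * (k : Int) + 2) 1 = [2 * (k : Int) + 1] := by
        have := PySem.List.pyRange_one_singleton (2 * (k : Int) + 1)
        rw [show (2 * (k : Int) + 1 + 1) = 2 * (k : Int) + 2 from by ring] at this
        exact this
      have hmid : ((PySem.List.pyRange 1 (2 * (k : Int) + 1) 1).map
            (fun i => rowdiff block w (lo + i) (hi - i))).sum
          = 2 * check_horz_altLoop block w 0 (lo + 1) (hi - 1) := by
        rw [← ih (lo + 1) (hi - 1) (by omega)]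
        rw [PySem.List.pyRange_one 1 (2 * (k : Int) + 1), PySem.List.pyRange_one 0 (2 * (k : Int))]
        rw [List.map_map, List.map_map]
        have : ((2 * (k : Int) + 1) - 1).toNat = ((2 * (k : Int)) - 0).toNat := by omega
        rw [this]
        congr 1
        apply List.map_congr_left
        intro j _
        simp only [Function.comp_apply]
        rw [show lo + (1 + (j : Int)) = lo + 1 + (0 + (j : Int)) from by ring,
            show hi - (1 + (j : Int)) = hi - 1 - (0 + (j : Int)) from by ring]
      rw [List.map_append, List.map_append, List.sum_append, List.sum_append, h1, h2, hmid]
      have hlast : rowdiff block w (lo + (2 * (k : Int) + 1)) (hi - (2 * (k : Int) + 1))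
          = rowdiff block w lo hi := by
        have e1 : lo + (2 * (k : Int) + 1) = hi := by omega
        have e2 : hi - (2 * (k : Int) + 1) = lo := by omega
        rw [e1, e2, rowdiff_symm]
      rw [altLoop_step block w lo hi (by omega)]
      simp only [List.map_cons, List.map_nil, List.sum_cons, List.sum_nil, hlast]
      ring

-- ===== VERDICT (by name: the statement is the Claim_ definition above) =====
theorem check_horz_spec : Claim_equal_check_horz := by
  intro block r _hdom _hpre
  simp only [Spec_check_horz, check_horz, check_horz_alt]
  by_cases hg : PySem.Int.mod ((block.length : Int) - r) 2 = 1 ∨ (block.length : Int) - 1 ≤ |r|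
  · rw [if_pos hg, if_pos hg]
  · rw [if_neg hg, if_neg hg]
    push Not at hg
    obtain ⟨hmod, habs⟩ := hg
    have habs' : |r| < (block.length : Int) - 1 := habs
    have hdvd : (2 : Int) ∣ ((block.length : Int) - r) := by
      rcases PySem.Int.mod_two_eq ((block.length : Int) - r) with h | h
      · exact (PySem.Int.mod_eq_zero_iff_dvd _ _).mp h
      · exact absurd h hmod
    by_cases hr : 0 ≤ r
    · rw [if_pos hr, if_pos hr, if_pos hr]
      have hrle : r ≤ |r| := le_abs_self r
      have hpos : 2 ≤ (block.length : Int) - r := by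
        obtain ⟨c, hc⟩ := hdvd; omega
      have hk2 : (block.length : Int) - r = 2 * ((((block.length : Int) - r) / 2).toNat : Int) := by
        obtain ⟨c, hc⟩ := hdvd
        have : (0 : Int) ≤ c := by omega
        omega
      have hmap : ((PySem.List.pyRange 0 ((block.length : Int) - r) 1).map (fun i =>
          ((PySem.List.pyRange 0 (PySem.Str.len (PySem.List.pyGetD block 0 "")) 1).map (fun l =>
            if PySem.Str.pyGet? (PySem.List.pyGetD block (i + r) "") l
                 = PySem.Str.pyGet? (PySem.List.pyGetD block (-1 - i) "") l
            then (0 : Int) else 1)).sum))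
          = (PySem.List.pyRange 0 ((block.length : Int) - r) 1).map (fun i =>
              rowdiff block (PySem.Str.len (PySem.List.pyGetD block 0 "")) (r + i) (((block.length : Int) - 1) - i)) := by
        apply List.map_congr_left
        intro i hi
        rw [PySem.List.mem_pyRange_one] at hi
        unfold rowdiff
        rw [pyGetD_neg_shift block i hi.1 (by omega)]
        have e1 : i + r = r + i := by omega
        have e2 : (block.length : Int) - 1 - i = ((block.length : Int) - 1) - i := by omega
        rw [e1, e2]
      rw [hmap, hk2,
          sum_eq_two_loop block (PySem.Str.len (PySem.List.pyGetD block 0 ""))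
            ((((block.length : Int) - r) / 2).toNat) r ((block.length : Int) - 1) (by omega),
          PySem.Int.floordiv_eq_ediv_of_pos (by norm_num),
          Int.mul_ediv_cancel_left _ (by norm_num)]
    · rw [if_neg hr, if_neg hr, if_neg hr]
      have hrneg : r < 0 := lt_of_not_ge hr
      have hrabs : -r ≤ |r| := neg_le_abs r
      have hdvd' : (2 : Int) ∣ ((block.length : Int) + r) := by
        obtain ⟨c, hc⟩ := hdvd; exact ⟨c + r, by omega⟩
      have hpos : 2 ≤ (block.length : Int) + r := by
        obtain ⟨c, hc⟩ := hdvd'; omega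
      have hk2 : (block.length : Int) + r = 2 * ((((block.length : Int) + r) / 2).toNat : Int) := by
        obtain ⟨c, hc⟩ := hdvd'
        have : (0 : Int) ≤ c := by omega
        omega
      have hmap : ((PySem.List.pyRange 0 ((block.length : Int) + r) 1).map (fun i =>
          ((PySem.List.pyRange 0 (PySem.Str.len (PySem.List.pyGetD block 0 "")) 1).map (fun l =>
            if PySem.Str.pyGet? (PySem.List.pyGetD block i "") l
                 = PySem.Str.pyGet? (PySem.List.pyGetD block (-1 - i + r) "") l
            then (0 : Int) else 1)).sum))
          = (PySem.List.pyRange 0 ((block.length : Int) + r) 1).map (fun i =>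
              rowdiff block (PySem.Str.len (PySem.List.pyGetD block 0 "")) (0 + i) ((((block.length : Int) - 1) + r) - i)) := by
        apply List.map_congr_left
        intro i hi
        rw [PySem.List.mem_pyRange_one] at hi
        unfold rowdiff
        have e : -1 - i + r = -1 - (i - r) := by omega
        rw [e, pyGetD_neg_shift block (i - r) (by omega) (by omega)]
        have e2 : (block.length : Int) - 1 - (i - r) = (((block.length : Int) - 1) + r) - i := by omega
        rw [e2]
        simp only [zero_add]
      rw [hmap, hk2,
          sum_eq_two_loop block (PySem.Str.len (PySem.List.pyGetD block 0 ""))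
            ((((block.length : Int) + r) / 2).toNat) 0 (((block.length : Int) - 1) + r) (by omega),
          PySem.Int.floordiv_eq_ediv_of_pos (by norm_num),
          Int.mul_ediv_cancel_left _ (by norm_num)]
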